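-- pv_equiv track=rewrite | github.com/wmemon/msrit_python_0x03 | 0x05.py | birthday_lookup
-- ===== SOURCE A (Python) =====
-- from collections import defaultdict
--
-- def birthday_lookup(li):
--     result = {}
--     if not isinstance(li, list):
--         return "[!]The function takes list as the argument."
--
--     for item in li:
--         if item[1] in result.keys():
--             result[item[1]].append(item[0])
--
--         if item[1] not in result.keys():
--             result[item[1]] = [item[0]]
--     result = defaultdict(lambda: "No one has a birthday on this day! ", result)
--     return result
-- ===== SOURCE B (Python) =====
-- from collections import defaultdict
--
-- def birthday_lookup(li):
--     if not isinstance(li, list):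
--         return "[!]The function takes list as the argument."
--     keys = dict.fromkeys(item[1] for item in li)
--     result = {k: [item[0] for item in li if item[1] == k] for k in keys}
--     return defaultdict(lambda: "No one has a birthday on this day! ", result)
-- ===== Notes on version B (the rewrite author's own statement) =====
-- stated objective: alternative
-- what changed: Replaced the single accumulating dict pass (membership test, append-or-insert) with a distinct-keys-then-filter decomposition: dict.fromkeys collects the birthdays in first-encounter order, then a dict comprehension builds each group by filtering the list.
import Mathlib
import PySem

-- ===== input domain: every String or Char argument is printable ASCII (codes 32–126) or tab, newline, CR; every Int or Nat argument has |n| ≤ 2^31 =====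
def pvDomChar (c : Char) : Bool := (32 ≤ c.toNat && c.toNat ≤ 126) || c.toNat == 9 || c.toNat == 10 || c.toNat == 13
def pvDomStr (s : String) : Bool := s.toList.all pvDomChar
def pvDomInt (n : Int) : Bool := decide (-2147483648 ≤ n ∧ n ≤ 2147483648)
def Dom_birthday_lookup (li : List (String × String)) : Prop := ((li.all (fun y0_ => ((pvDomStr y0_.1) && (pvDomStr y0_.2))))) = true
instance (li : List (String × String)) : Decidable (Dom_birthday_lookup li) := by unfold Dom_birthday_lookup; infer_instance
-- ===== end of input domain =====

-- B replaces A's single accumulating dict pass by a distinct-keys-then-filter decomposition (same return value; no speed claim).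

-- ===== PORT A =====
-- A: one pass; if the birthday key is present, append the name, else insert a fresh singleton list.
def birthday_lookup (li : List (String × String)) : List (String × List String) :=
  (li.foldl
    (fun (result : PySem.Dict String (List String)) item =>
      let r1 := if result.contains item.2
                then result.modify item.2 [] (fun v => v ++ [item.1])   -- result[item[1]].append(item[0])
                else result
      if r1.contains item.2 then r1 else r1.insert item.2 [item.1])
    PySem.Dict.empty).items

-- ===== PORT B =====
-- B: distinct birthdays in first-encounter order (dict.fromkeys), then one filter pass per key.
def birthday_lookup_alt (li : List (String × String)) : List (String × List String) :=
  (PySem.List.dedup (li.map (fun item => item.2))).map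
    (fun k => (k, (li.filter (fun item => item.2 == k)).map (fun item => item.1)))

-- ===== PRECONDITION & SPEC =====
def Spec_birthday_lookup (li : List (String × String)) (out : List (String × List String)) : Prop := out = birthday_lookup_alt li
instance (li : List (String × String)) (out : List (String × List String)) : Decidable (Spec_birthday_lookup li out) := by unfold Spec_birthday_lookup; infer_instance

-- ===== CLAIM (what is proved, stated in full; the proofs are below) =====
def Claim_equal_birthday_lookup : Prop := ∀ (li : List (String × String)), Dom_birthday_lookup li → Spec_birthday_lookup li (birthday_lookup li)

-- ===== LEMMAS AND PROOFS =====

-- A's branchy loop body is exactly Python's d[k] = d.get(k, []) + [name] (Dict.modify).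
lemma stepA_eq_modify (d : PySem.Dict String (List String)) (item : String × String) :
    (let r1 := if d.contains item.2 then d.modify item.2 [] (fun v => v ++ [item.1]) else d
     if r1.contains item.2 then r1 else r1.insert item.2 [item.1])
    = d.modify item.2 [] (fun v => v ++ [item.1]) := by
  by_cases h : d.contains item.2 = true
  · simp [h, PySem.Dict.contains_modify]
  · simp only [Bool.not_eq_true] at h
    simp [PySem.Dict.modify, PySem.Dict.getD_of_not_contains, h]

theorem birthday_lookup_spec : Claim_equal_birthday_lookup := by
  intro li _
  unfold Spec_birthday_lookup birthday_lookup birthday_lookup_alt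
  have hfold :
      li.foldl
        (fun (result : PySem.Dict String (List String)) item =>
          let r1 := if result.contains item.2
                    then result.modify item.2 [] (fun v => v ++ [item.1])
                    else result
          if r1.contains item.2 then r1 else r1.insert item.2 [item.1])
        PySem.Dict.empty
      = (li.map Prod.swap).foldl
          (fun (d : PySem.Dict String (List String)) p => d.modify p.1 [] (fun v => v ++ [p.2]))
          PySem.Dict.empty := by
    rw [List.foldl_map]
    have hfun : (fun (result : PySem.Dict String (List String)) item =>
        let r1 := if result.contains item.2
                  then result.modify item.2 [] (fun v => v ++ [item.1])
                  else result
        if r1.contains item.2 then r1 else r1.insert item.2 [item.1])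
      = fun (d : PySem.Dict String (List String)) (item : String × String) =>
          d.modify item.2 [] (fun v => v ++ [item.1]) :=
      funext fun d => funext fun item => stepA_eq_modify d item
    rw [hfun]
    rfl
  rw [hfold]
  set l := li.map Prod.swap with hl
  have hnd : ((l.foldl (fun (d : PySem.Dict String (List String)) p =>
      d.modify p.1 [] (fun v => v ++ [p.2])) PySem.Dict.empty).keys).Nodup := by
    exact PySem.Dict.nodup_keys_foldl_modify_key l Prod.fst [] _ PySem.Dict.empty
      (by simp)
  rw [PySem.Dict.items_eq_map_keys _ hnd ([] : List String)]
  have hkeys : (l.foldl (fun (d : PySem.Dict String (List String)) p =>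
      d.modify p.1 [] (fun v => v ++ [p.2])) PySem.Dict.empty).keys
      = PySem.Set.ofList (li.map (fun item => item.2)) := by
    rw [PySem.Dict.keys_foldl_modify_key]
    simp [PySem.Dict.keys_empty, PySem.Set.update, PySem.Set.ofList_eq_foldl, hl,
      List.map_map, Function.comp_def, Prod.swap]
  rw [hkeys, PySem.List.dedup_eq_ofList]
  apply List.map_congr_left
  intro k _
  have hg := PySem.Dict.getD_foldl_modify_append (d := PySem.Dict.empty) (l := l) (c := k)
  rw [hg]
  simp [hl, List.filter_map, List.map_map, Function.comp_def, Prod.swap,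
    PySem.Dict.getD_empty]
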